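-- pv_equiv track=rewrite | github.com/CarlesLlobet/cCrypt | cDFA.py | checkFault
-- ===== SOURCE A (Python) =====
-- affectedColumn1 = [1,0,0,0,0,0,0,1,0,0,1,0,0,1,0,0]
--
-- affectedColumn2 = [0,1,0,0,1,0,0,0,0,0,0,1,0,0,1,0]
--
-- affectedColumn3 = [0,0,1,0,0,1,0,0,1,0,0,0,0,0,0,1]
--
-- affectedColumn4 = [0,0,0,1,0,0,1,0,0,1,0,0,1,0,0,0]
--
-- def isModified(bit):
--     return int(bit/bit) if bit else 0
--
-- def checkFault(error):
--     masked = [isModified(e) for e in error]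
--     if masked == affectedColumn1:
--         return 1
--     elif masked == affectedColumn2:
--         return 2
--     elif masked == affectedColumn3:
--         return 3
--     elif masked == affectedColumn4:
--         return 4
--     else:
--         return -1
-- ===== SOURCE B (Python) =====
-- def isModified(bit):
--     return int(bit/bit) if bit else 0
--
-- def checkFault(error):
--     # A fault in AES column c flips exactly the 4 state bytes on diagonal c,
--     # i.e. the indices i with (i % 4 + i // 4) % 4 == c.  So instead of
--     # comparing against stored pattern vectors, classify each modified byte
--     # by its diagonal in one pass: the vector matches pattern c+1 iff it has
--     # length 16 and exactly 4 modified bytes, all on the same diagonal c.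
--     diag = None
--     ones = 0
--     for i, e in enumerate(error):
--         if isModified(e):
--             c = (i % 4 + i // 4) % 4
--             if diag is None:
--                 diag = c
--             elif diag != c:
--                 return -1
--             ones += 1
--     if len(error) == 16 and ones == 4 and diag is not None:
--         return diag + 1
--     return -1
-- ===== Notes on version B (the rewrite author's own statement) =====
-- stated objective: alternative
-- what changed: Drops the four stored pattern vectors: B classifies each modified byte by its AES diagonal (i%4 + i//4)%4 in a single pass with an early exit on the first diagonal conflict, reporting c+1 iff exactly the 4 bytes of one diagonal c are modified in a length-16 vector.
import Mathlib
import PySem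

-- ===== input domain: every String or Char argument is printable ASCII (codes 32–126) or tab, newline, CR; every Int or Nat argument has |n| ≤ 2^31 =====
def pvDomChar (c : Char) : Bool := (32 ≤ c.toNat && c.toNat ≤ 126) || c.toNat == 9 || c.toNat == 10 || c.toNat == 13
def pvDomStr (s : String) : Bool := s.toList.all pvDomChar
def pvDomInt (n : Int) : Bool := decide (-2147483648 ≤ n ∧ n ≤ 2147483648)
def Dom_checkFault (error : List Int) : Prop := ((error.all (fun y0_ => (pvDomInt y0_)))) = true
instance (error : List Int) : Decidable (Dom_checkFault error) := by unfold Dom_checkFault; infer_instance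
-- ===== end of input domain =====

-- B drops the four stored pattern vectors and instead classifies each modified byte by its
-- AES diagonal (i%4 + i//4)%4 in a single pass (objective: alternative algorithm, same cost).

-- ===== PORT A =====
def affectedColumn1 : List Int := [1,0,0,0,0,0,0,1,0,0,1,0,0,1,0,0]
def affectedColumn2 : List Int := [0,1,0,0,1,0,0,0,0,0,0,1,0,0,1,0]
def affectedColumn3 : List Int := [0,0,1,0,0,1,0,0,1,0,0,0,0,0,0,1]
def affectedColumn4 : List Int := [0,0,0,1,0,0,1,0,0,1,0,0,1,0,0,0]

-- isModified: 'int(bit/bit) if bit else 0'; on an Int argument bit/bit is exactly 1.0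
-- whenever bit is truthy (nonzero), so this hand port is exact on Int inputs.
def isModified (bit : Int) : Int := if bit ≠ 0 then 1 else 0

def checkFault (error : List Int) : Int :=
  let masked := error.map isModified
  if masked = affectedColumn1 then 1
  else if masked = affectedColumn2 then 2
  else if masked = affectedColumn3 then 3
  else if masked = affectedColumn4 then 4
  else -1

-- ===== PORT B =====
-- The enumerate index i is a nonnegative int, on which Python's % and // coincide with
-- Nat's % and /, so the index arithmetic is ported in Nat (exact on the nonneg index).
-- The loop with its early 'return -1' is the structural recursion goAlt; the final
-- 'if len(error)==16 and ones==4 and diag is not None' check runs at the empty list,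
-- where i equals len(error).
def goAlt : List Int → Nat → Option Nat → Int → Int
  | [], i, diag, ones =>
      if i = 16 ∧ ones = 4 then
        match diag with
        | some d => (d : Int) + 1
        | none => -1
      else -1
  | e :: rest, i, diag, ones =>
      if isModified e ≠ 0 then
        let c := (i % 4 + i / 4) % 4
        match diag with
        | none => goAlt rest (i+1) (some c) (ones+1)
        | some d => if d ≠ c then -1 else goAlt rest (i+1) (some d) (ones+1)
      else goAlt rest (i+1) diag ones

def checkFault_alt (error : List Int) : Int := goAlt error 0 none 0

-- ===== PRECONDITION & SPEC =====
def Spec_checkFault (error : List Int) (out : Int) : Prop := out = checkFault_alt error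
instance (error : List Int) (out : Int) : Decidable (Spec_checkFault error out) := by unfold Spec_checkFault; infer_instance

-- ===== CLAIM (what is proved, stated in full; the proofs are below) =====
def Claim_equal_checkFault : Prop := ∀ (error : List Int), Dom_checkFault error → Spec_checkFault error (checkFault error)

-- ===== LEMMAS AND PROOFS =====

-- Both programs depend on the input only through the truthiness vector error.map (· != 0);
-- we factor each side through Bool and compare the Bool-level programs.

def i2 (b : Bool) : Int := if b then 1 else 0

def diag (i : Nat) : Nat := (i % 4 + i / 4) % 4

def col1b : List Bool := [true,false,false,false,false,false,false,true,false,false,true,false,false,true,false,false]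
def col2b : List Bool := [false,true,false,false,true,false,false,false,false,false,false,true,false,false,true,false]
def col3b : List Bool := [false,false,true,false,false,true,false,false,true,false,false,false,false,false,false,true]
def col4b : List Bool := [false,false,false,true,false,false,true,false,false,true,false,false,true,false,false,false]

def chainB (v : List Bool) : Int :=
  if v = col1b then 1
  else if v = col2b then 2
  else if v = col3b then 3
  else if v = col4b then 4
  else -1

def goB : List Bool → Nat → Option Nat → Int → Int
  | [], i, d, ones =>
      if i = 16 ∧ ones = 4 then
        match d with
        | some c => (c : Int) + 1
        | none => -1
      else -1
  | b :: rest, i, d, ones =>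
      if b then
        let c := diag i
        match d with
        | none => goB rest (i+1) (some c) (ones+1)
        | some dd => if dd ≠ c then -1 else goB rest (i+1) (some dd) (ones+1)
      else goB rest (i+1) d ones

theorem i2_injective : Function.Injective i2 := by
  intro a b h
  cases a <;> cases b <;> simp [i2] at h ⊢

theorem masked_factor (error : List Int) :
    error.map isModified = (error.map (fun e => e != 0)).map i2 := by
  induction error with
  | nil => rfl
  | cons e rest ih =>
    by_cases he : e = 0 <;> simp [isModified, i2, he, ih]

theorem chain_bridge (error : List Int) :
    checkFault error = chainB (error.map (fun e => e != 0)) := by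
  have h1 : affectedColumn1 = col1b.map i2 := by decide
  have h2 : affectedColumn2 = col2b.map i2 := by decide
  have h3 : affectedColumn3 = col3b.map i2 := by decide
  have h4 : affectedColumn4 = col4b.map i2 := by decide
  simp only [checkFault, chainB, masked_factor, h1, h2, h3, h4,
    (List.map_injective_iff.mpr i2_injective).eq_iff]

theorem go_bridge (error : List Int) :
    ∀ (i : Nat) (d : Option Nat) (ones : Int),
      goAlt error i d ones = goB (error.map (fun e => e != 0)) i d ones := by
  induction error with
  | nil => intro i d ones; rfl
  | cons e rest ih =>
    intro i d ones
    by_cases he : e = 0 <;> cases d <;>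
      simp [goAlt, goB, diag, isModified, he, ih]

theorem goB_ne16 : ∀ (v : List Bool) (i : Nat) (d : Option Nat) (ones : Int),
    i + v.length ≠ 16 → goB v i d ones = -1 := by
  intro v
  induction v with
  | nil =>
    intro i d ones h
    simp only [List.length_nil, Nat.add_zero] at h
    simp [goB, h]
  | cons b rest ih =>
    intro i d ones h
    have h' : (i + 1) + rest.length ≠ 16 := by
      simp only [List.length_cons] at h; omega
    cases b with
    | false => simp [goB, ih _ _ _ h']
    | true =>
      cases d with
      | none => simp [goB, ih _ _ _ h']
      | some dd =>
        by_cases hd : dd ≠ diag i <;> simp [goB, hd, ih _ _ _ h']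

-- If the scan does not answer -1, every modified position lies on one diagonal c,
-- the whole vector was consumed at index 16, and the modified count reaches 4.
theorem goB_char : ∀ (v : List Bool) (i : Nat) (d : Option Nat) (o : Int),
    goB v i d o ≠ -1 →
    ∃ c : Nat, (∀ x, d = some x → x = c) ∧
      (∀ j (hj : j < v.length), v[j] = true → diag (i + j) = c) ∧
      i + v.length = 16 ∧ o + (v.count true : Int) = 4 := by
  intro v
  induction v with
  | nil =>
    intro i d o hne
    cases d with
    | none => exact absurd (by simp only [goB]; split <;> rfl) hne
    | some c =>
      by_cases hP : i = 16 ∧ o = 4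
      · refine ⟨c, ?_, ?_, ?_, ?_⟩
        · intro x hx; injection hx with hx; omega
        · intro j hj; simp at hj
        · simpa using hP.1
        · simp [hP.2]
      · exact absurd (by simp [goB, hP]) hne
  | cons b rest ih =>
    intro i d o hne
    cases b with
    | false =>
      have hne' : goB rest (i+1) d o ≠ -1 := by simpa [goB] using hne
      obtain ⟨c, hd, ht, hl, hc⟩ := ih (i+1) d o hne'
      refine ⟨c, hd, ?_, ?_, ?_⟩
      · intro j hj hv
        cases j with
        | zero => simp at hv
        | succ j' =>
          have : i + (j' + 1) = (i + 1) + j' := by omega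
          rw [this]
          exact ht j' (by simpa using hj) (by simpa using hv)
      · simp only [List.length_cons]; omega
      · simpa [List.count_cons] using hc
    | true =>
      cases d with
      | none =>
        have hne' : goB rest (i+1) (some (diag i)) (o+1) ≠ -1 := by simpa [goB] using hne
        obtain ⟨c, hd, ht, hl, hc⟩ := ih (i+1) (some (diag i)) (o+1) hne'
        have hdc : diag i = c := hd _ rfl
        refine ⟨c, ?_, ?_, ?_, ?_⟩
        · intro x hx; simp at hx
        · intro j hj hv
          cases j with
          | zero => simpa using hdc
          | succ j' =>
            have : i + (j' + 1) = (i + 1) + j' := by omega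
            rw [this]
            exact ht j' (by simpa using hj) (by simpa using hv)
        · simp only [List.length_cons]; omega
        · have hcc : (true :: rest).count true = rest.count true + 1 := by
            simp [List.count_cons]
          rw [hcc]; push_cast; omega
      | some dd =>
        by_cases hd0 : dd ≠ diag i
        · exact absurd (by simp [goB, hd0]) hne
        · have hddi : dd = diag i := by omega
          have hne' : goB rest (i+1) (some dd) (o+1) ≠ -1 := by
            simpa [goB, hd0] using hne
          obtain ⟨c, hd, ht, hl, hc⟩ := ih (i+1) (some dd) (o+1) hne'
          have hdc : dd = c := hd _ rfl
          refine ⟨c, ?_, ?_, ?_, ?_⟩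
          · intro x hx; injection hx with hx; omega
          · intro j hj hv
            cases j with
            | zero => simp only [Nat.add_zero]; omega
            | succ j' =>
              have : i + (j' + 1) = (i + 1) + j' := by omega
              rw [this]
              exact ht j' (by simpa using hj) (by simpa using hv)
          · simp only [List.length_cons]; omega
          · have hcc : (true :: rest).count true = rest.count true + 1 := by
              simp [List.count_cons]
            rw [hcc]; push_cast; omega

theorem main16 (v : List Bool) (h : v.length = 16) : chainB v = goB v 0 none 0 := by
  by_cases hv : v = col1b ∨ v = col2b ∨ v = col3b ∨ v = col4b
  · rcases hv with rfl | rfl | rfl | rfl <;> decide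
  · push_neg at hv
    obtain ⟨h1, h2, h3, h4⟩ := hv
    have hc : chainB v = -1 := by simp [chainB, h1, h2, h3, h4]
    rw [hc]
    by_contra hne
    have hne' : goB v 0 none 0 ≠ -1 := fun q => hne q.symm
    obtain ⟨c, -, Htrue, -, Hcount⟩ := goB_char v 0 none 0 hne'
    have hcnt : v.count true = 4 := by omega
    have hmem : true ∈ v := by
      have : 0 < v.count true := by omega
      exact List.count_pos_iff.mp this
    obtain ⟨j, hj, hvj⟩ := List.getElem_of_mem hmem
    have hc4 : c < 4 := by
      have hd := Htrue j hj hvj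
      rw [← hd]
      unfold diag
      omega
    cases v with
    | nil => simp at h
    | cons b0 v =>
    cases v with
    | nil => simp at h
    | cons b1 v =>
    cases v with
    | nil => simp at h
    | cons b2 v =>
    cases v with
    | nil => simp at h
    | cons b3 v =>
    cases v with
    | nil => simp at h
    | cons b4 v =>
    cases v with
    | nil => simp at h
    | cons b5 v =>
    cases v with
    | nil => simp at h
    | cons b6 v =>
    cases v with
    | nil => simp at h
    | cons b7 v =>
    cases v with
    | nil => simp at h
    | cons b8 v =>
    cases v with
    | nil => simp at h
    | cons b9 v =>
    cases v with
    | nil => simp at h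
    | cons b10 v =>
    cases v with
    | nil => simp at h
    | cons b11 v =>
    cases v with
    | nil => simp at h
    | cons b12 v =>
    cases v with
    | nil => simp at h
    | cons b13 v =>
    cases v with
    | nil => simp at h
    | cons b14 v =>
    cases v with
    | nil => simp at h
    | cons b15 v =>
    cases v with
    | cons bx v => simp at h
    | nil =>
    clear hne hne' hcnt hmem hvj hj
    interval_cases c
    · have e1 : b1 = false := by
        cases hb : b1 with
        | false => rfl
        | true => exact absurd (Htrue 1 (by simp) hb) (by decide)
      have e2 : b2 = false := by
        cases hb : b2 with
        | false => rfl
        | true => exact absurd (Htrue 2 (by simp) hb) (by decide)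
      have e3 : b3 = false := by
        cases hb : b3 with
        | false => rfl
        | true => exact absurd (Htrue 3 (by simp) hb) (by decide)
      have e4 : b4 = false := by
        cases hb : b4 with
        | false => rfl
        | true => exact absurd (Htrue 4 (by simp) hb) (by decide)
      have e5 : b5 = false := by
        cases hb : b5 with
        | false => rfl
        | true => exact absurd (Htrue 5 (by simp) hb) (by decide)
      have e6 : b6 = false := by
        cases hb : b6 with
        | false => rfl
        | true => exact absurd (Htrue 6 (by simp) hb) (by decide)
      have e8 : b8 = false := by
        cases hb : b8 with
        | false => rfl
        | true => exact absurd (Htrue 8 (by simp) hb) (by decide)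
      have e9 : b9 = false := by
        cases hb : b9 with
        | false => rfl
        | true => exact absurd (Htrue 9 (by simp) hb) (by decide)
      have e11 : b11 = false := by
        cases hb : b11 with
        | false => rfl
        | true => exact absurd (Htrue 11 (by simp) hb) (by decide)
      have e12 : b12 = false := by
        cases hb : b12 with
        | false => rfl
        | true => exact absurd (Htrue 12 (by simp) hb) (by decide)
      have e14 : b14 = false := by
        cases hb : b14 with
        | false => rfl
        | true => exact absurd (Htrue 14 (by simp) hb) (by decide)
      have e15 : b15 = false := by
        cases hb : b15 with
        | false => rfl
        | true => exact absurd (Htrue 15 (by simp) hb) (by decide)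
      subst e1 e2 e3 e4 e5 e6 e8 e9 e11 e12 e14 e15
      clear Htrue
      revert h1 h2 h3 h4 Hcount
      cases b0 <;> cases b7 <;> cases b10 <;> cases b13 <;> decide
    · have e0 : b0 = false := by
        cases hb : b0 with
        | false => rfl
        | true => exact absurd (Htrue 0 (by simp) hb) (by decide)
      have e2 : b2 = false := by
        cases hb : b2 with
        | false => rfl
        | true => exact absurd (Htrue 2 (by simp) hb) (by decide)
      have e3 : b3 = false := by
        cases hb : b3 with
        | false => rfl
        | true => exact absurd (Htrue 3 (by simp) hb) (by decide)
      have e5 : b5 = false := by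
        cases hb : b5 with
        | false => rfl
        | true => exact absurd (Htrue 5 (by simp) hb) (by decide)
      have e6 : b6 = false := by
        cases hb : b6 with
        | false => rfl
        | true => exact absurd (Htrue 6 (by simp) hb) (by decide)
      have e7 : b7 = false := by
        cases hb : b7 with
        | false => rfl
        | true => exact absurd (Htrue 7 (by simp) hb) (by decide)
      have e8 : b8 = false := by
        cases hb : b8 with
        | false => rfl
        | true => exact absurd (Htrue 8 (by simp) hb) (by decide)
      have e9 : b9 = false := by
        cases hb : b9 with
        | false => rfl
        | true => exact absurd (Htrue 9 (by simp) hb) (by decide)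
      have e10 : b10 = false := by
        cases hb : b10 with
        | false => rfl
        | true => exact absurd (Htrue 10 (by simp) hb) (by decide)
      have e12 : b12 = false := by
        cases hb : b12 with
        | false => rfl
        | true => exact absurd (Htrue 12 (by simp) hb) (by decide)
      have e13 : b13 = false := by
        cases hb : b13 with
        | false => rfl
        | true => exact absurd (Htrue 13 (by simp) hb) (by decide)
      have e15 : b15 = false := by
        cases hb : b15 with
        | false => rfl
        | true => exact absurd (Htrue 15 (by simp) hb) (by decide)
      subst e0 e2 e3 e5 e6 e7 e8 e9 e10 e12 e13 e15
      clear Htrue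
      revert h1 h2 h3 h4 Hcount
      cases b1 <;> cases b4 <;> cases b11 <;> cases b14 <;> decide
    · have e0 : b0 = false := by
        cases hb : b0 with
        | false => rfl
        | true => exact absurd (Htrue 0 (by simp) hb) (by decide)
      have e1 : b1 = false := by
        cases hb : b1 with
        | false => rfl
        | true => exact absurd (Htrue 1 (by simp) hb) (by decide)
      have e3 : b3 = false := by
        cases hb : b3 with
        | false => rfl
        | true => exact absurd (Htrue 3 (by simp) hb) (by decide)
      have e4 : b4 = false := by
        cases hb : b4 with
        | false => rfl
        | true => exact absurd (Htrue 4 (by simp) hb) (by decide)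
      have e6 : b6 = false := by
        cases hb : b6 with
        | false => rfl
        | true => exact absurd (Htrue 6 (by simp) hb) (by decide)
      have e7 : b7 = false := by
        cases hb : b7 with
        | false => rfl
        | true => exact absurd (Htrue 7 (by simp) hb) (by decide)
      have e9 : b9 = false := by
        cases hb : b9 with
        | false => rfl
        | true => exact absurd (Htrue 9 (by simp) hb) (by decide)
      have e10 : b10 = false := by
        cases hb : b10 with
        | false => rfl
        | true => exact absurd (Htrue 10 (by simp) hb) (by decide)
      have e11 : b11 = false := by
        cases hb : b11 with
        | false => rfl
        | true => exact absurd (Htrue 11 (by simp) hb) (by decide)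
      have e12 : b12 = false := by
        cases hb : b12 with
        | false => rfl
        | true => exact absurd (Htrue 12 (by simp) hb) (by decide)
      have e13 : b13 = false := by
        cases hb : b13 with
        | false => rfl
        | true => exact absurd (Htrue 13 (by simp) hb) (by decide)
      have e14 : b14 = false := by
        cases hb : b14 with
        | false => rfl
        | true => exact absurd (Htrue 14 (by simp) hb) (by decide)
      subst e0 e1 e3 e4 e6 e7 e9 e10 e11 e12 e13 e14
      clear Htrue
      revert h1 h2 h3 h4 Hcount
      cases b2 <;> cases b5 <;> cases b8 <;> cases b15 <;> decide
    · have e0 : b0 = false := by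
        cases hb : b0 with
        | false => rfl
        | true => exact absurd (Htrue 0 (by simp) hb) (by decide)
      have e1 : b1 = false := by
        cases hb : b1 with
        | false => rfl
        | true => exact absurd (Htrue 1 (by simp) hb) (by decide)
      have e2 : b2 = false := by
        cases hb : b2 with
        | false => rfl
        | true => exact absurd (Htrue 2 (by simp) hb) (by decide)
      have e4 : b4 = false := by
        cases hb : b4 with
        | false => rfl
        | true => exact absurd (Htrue 4 (by simp) hb) (by decide)
      have e5 : b5 = false := by
        cases hb : b5 with
        | false => rfl
        | true => exact absurd (Htrue 5 (by simp) hb) (by decide)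
      have e7 : b7 = false := by
        cases hb : b7 with
        | false => rfl
        | true => exact absurd (Htrue 7 (by simp) hb) (by decide)
      have e8 : b8 = false := by
        cases hb : b8 with
        | false => rfl
        | true => exact absurd (Htrue 8 (by simp) hb) (by decide)
      have e10 : b10 = false := by
        cases hb : b10 with
        | false => rfl
        | true => exact absurd (Htrue 10 (by simp) hb) (by decide)
      have e11 : b11 = false := by
        cases hb : b11 with
        | false => rfl
        | true => exact absurd (Htrue 11 (by simp) hb) (by decide)
      have e13 : b13 = false := by
        cases hb : b13 with
        | false => rfl
        | true => exact absurd (Htrue 13 (by simp) hb) (by decide)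
      have e14 : b14 = false := by
        cases hb : b14 with
        | false => rfl
        | true => exact absurd (Htrue 14 (by simp) hb) (by decide)
      have e15 : b15 = false := by
        cases hb : b15 with
        | false => rfl
        | true => exact absurd (Htrue 15 (by simp) hb) (by decide)
      subst e0 e1 e2 e4 e5 e7 e8 e10 e11 e13 e14 e15
      clear Htrue
      revert h1 h2 h3 h4 Hcount
      cases b3 <;> cases b6 <;> cases b9 <;> cases b12 <;> decide

theorem main_bool (v : List Bool) : chainB v = goB v 0 none 0 := by
  by_cases h : v.length = 16
  · exact main16 v h
  · have hne : ∀ c : List Bool, c.length = 16 → v ≠ c := by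
      intro c hc hvc; exact h (hvc ▸ hc)
    rw [goB_ne16 v 0 none 0 (by simpa using h)]
    simp [chainB, hne col1b (by decide), hne col2b (by decide),
      hne col3b (by decide), hne col4b (by decide)]

-- ===== VERDICT (by name: the statement is the Claim_ definition above) =====
theorem checkFault_spec : Claim_equal_checkFault := by
  intro error _
  show checkFault error = checkFault_alt error
  rw [chain_bridge, checkFault_alt, go_bridge, main_bool]
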